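-- pv_equiv track=rewrite | github.com/mephessivolc/tese | code/src/qumod_qubits.py | edge_to_idx
-- ===== SOURCE A (Python) =====
-- def edge_to_idx(i, j, N):
--     if i == j:
--         raise ValueError("Não existe modo para i == j")
--
--     idx = 0
--     for u in range(N):
--         for v in range(N):
--             if u != v:
--                 if u == i and v == j:
--                     return idx
--                 idx += 1
-- ===== SOURCE B (Python) =====
-- def edge_to_idx(i, j, N):
--     # Closed form: row i contributes N-1 off-diagonal entries; within the row,
--     # column j is shifted down by one if it comes after the skipped diagonal.
--     if i == j:
--         raise ValueError("Não existe modo para i == j")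
--     if 0 <= i < N and 0 <= j < N:
--         return i * (N - 1) + j - (1 if i < j else 0)
--     return None
-- ===== Notes on version B (the rewrite author's own statement) =====
-- stated objective: faster
-- what changed: Replaced the nested scan over all N^2 (u,v) pairs with a closed-form index i*(N-1)+j-(1 if i<j else 0) plus a range check.
import Mathlib
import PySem

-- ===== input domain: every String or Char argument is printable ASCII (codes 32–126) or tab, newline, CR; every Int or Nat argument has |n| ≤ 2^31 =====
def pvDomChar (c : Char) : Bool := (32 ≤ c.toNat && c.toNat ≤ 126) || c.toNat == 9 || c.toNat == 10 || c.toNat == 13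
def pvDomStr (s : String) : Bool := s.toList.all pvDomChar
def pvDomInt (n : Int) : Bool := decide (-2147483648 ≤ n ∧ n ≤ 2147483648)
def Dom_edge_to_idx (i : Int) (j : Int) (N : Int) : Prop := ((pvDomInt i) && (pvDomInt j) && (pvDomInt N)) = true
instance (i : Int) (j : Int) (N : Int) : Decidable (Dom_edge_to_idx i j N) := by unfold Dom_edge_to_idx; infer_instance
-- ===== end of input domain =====

-- B replaces A's nested scan over all N^2 (u,v) pairs with a closed-form index (objective: faster, O(1) vs O(N^2)).
-- ===== PORT A =====
-- inner 'for v in range(N)': .inl found index (early return), .inr updated idx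
def edgeInnerA (i : Int) (j : Int) (u : Int) (idx : Int) : List Int → Int ⊕ Int
  | [] => .inr idx
  | v :: vs =>
    if u ≠ v then
      if u = i ∧ v = j then .inl idx
      else edgeInnerA i j u (idx + 1) vs
    else edgeInnerA i j u idx vs

-- outer 'for u in range(N)'
def edgeOuterA (i : Int) (j : Int) (cols : List Int) (idx : Int) : List Int → Option Int
  | [] => none
  | u :: us =>
    match edgeInnerA i j u idx cols with
    | .inl r => some r
    | .inr idx' => edgeOuterA i j cols idx' us

def edge_to_idx (i : Int) (j : Int) (N : Int) : Option Int :=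
  if i = j then none  -- Python raises ValueError here (outside Pre_)
  else edgeOuterA i j (PySem.List.pyRange 0 N 1) 0 (PySem.List.pyRange 0 N 1)

-- ===== PORT B =====
def edge_to_idx_alt (i : Int) (j : Int) (N : Int) : Option Int :=
  if i = j then none  -- B raises ValueError here too (outside Pre_)
  else if 0 ≤ i ∧ i < N ∧ 0 ≤ j ∧ j < N then
    some (i * (N - 1) + j - (if i < j then 1 else 0))
  else none

-- ===== PRECONDITION & SPEC =====
-- Pre_ excludes exactly i = j, where the Python A (and B) raise ValueError.
def Pre_edge_to_idx (i : Int) (j : Int) (_N : Int) : Prop := i ≠ j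
instance (i : Int) (j : Int) (N : Int) : Decidable (Pre_edge_to_idx i j N) := by unfold Pre_edge_to_idx; infer_instance
def pvWitness_edge_to_idx : Int × Int × Int := (1, 2, 4)

def Spec_edge_to_idx (i : Int) (j : Int) (N : Int) (out : Option Int) : Prop := out = edge_to_idx_alt i j N
instance (i : Int) (j : Int) (N : Int) (out : Option Int) : Decidable (Spec_edge_to_idx i j N out) := by unfold Spec_edge_to_idx; infer_instance

-- ===== CLAIM (what is proved, stated in full; the proofs are below) =====
def Claim_equal_edge_to_idx : Prop := ∀ (i : Int) (j : Int) (N : Int), Dom_edge_to_idx i j N → Pre_edge_to_idx i j N → Spec_edge_to_idx i j N (edge_to_idx i j N)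

-- ===== LEMMAS AND PROOFS =====

-- ===== VERDICT (by name: the statement is the Claim_ definition above) =====
-- number of v in L with v ≠ u, as an Int
def colCount (u : Int) (L : List Int) : Int := ((L.filter (fun v => v ≠ u)).length : Int)

theorem colCount_cons_ne (u v : Int) (L : List Int) (h : v ≠ u) :
    colCount u (v :: L) = 1 + colCount u L := by
  simp [colCount, h]; omega

theorem colCount_cons_eq (u : Int) (L : List Int) :
    colCount u (u :: L) = colCount u L := by
  simp [colCount]

theorem innerA_no_find (i j u : Int) (L : List Int)
    (h : ∀ v ∈ L, ¬(u = i ∧ v = j)) (idx : Int) :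
    edgeInnerA i j u idx L = .inr (idx + colCount u L) := by
  induction L generalizing idx with
  | nil => simp [edgeInnerA, colCount]
  | cons v vs ih =>
    by_cases hv : u = v
    · subst hv
      simp only [edgeInnerA, ne_eq, not_true_eq_false, if_false, colCount_cons_eq]
      exact ih (fun x hx => h x (List.mem_cons_of_mem _ hx)) idx
    · have hnf : ¬(u = i ∧ v = j) := h v (List.mem_cons_self ..)
      simp only [edgeInnerA, ne_eq, hv, not_false_eq_true, if_true, if_neg hnf]
      rw [ih (fun x hx => h x (List.mem_cons_of_mem _ hx)) (idx + 1),
          colCount_cons_ne u v vs (fun hh => hv hh.symm)]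
      congr 1; omega

theorem innerA_find (i j : Int) (hij : i ≠ j) (L1 L2 : List Int)
    (h1 : j ∉ L1) (idx : Int) :
    edgeInnerA i j i idx (L1 ++ j :: L2) = .inl (idx + colCount i L1) := by
  induction L1 generalizing idx with
  | nil =>
    have : i ≠ j := hij
    simp [edgeInnerA, this, colCount]
  | cons v vs ih =>
    have hvj : v ≠ j := fun h => h1 (h ▸ List.mem_cons_self ..)
    have hj2 : j ∉ vs := fun h => h1 (List.mem_cons_of_mem _ h)
    by_cases hv : i = v
    · subst hv
      simp only [List.cons_append, edgeInnerA, ne_eq, not_true_eq_false, if_false,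
        colCount_cons_eq]
      exact ih hj2 idx
    · have hnf : ¬(i = i ∧ v = j) := fun hh => hvj hh.2
      simp only [List.cons_append, edgeInnerA, ne_eq, hv, not_false_eq_true, if_true]
      rw [ih hj2 (idx + 1), colCount_cons_ne i v vs (fun hh => hv hh.symm),
          if_neg (fun hh : True ∧ v = j => hvj hh.2)]
      congr 1; omega

theorem outerA_none (i j : Int) (cols : List Int) (us : List Int)
    (h : ∀ u ∈ us, ¬(u = i ∧ j ∈ cols ∧ u ≠ j)) (hij : i ≠ j) (idx : Int) :
    edgeOuterA i j cols idx us = none := by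
  induction us generalizing idx with
  | nil => rfl
  | cons u us ih =>
    have hu := h u (List.mem_cons_self ..)
    have hfind : ∀ v ∈ cols, ¬(u = i ∧ v = j) := by
      intro v hv hx
      exact hu ⟨hx.1, hx.2 ▸ hv, by omega⟩
    rw [edgeOuterA, innerA_no_find i j u cols hfind idx]
    exact ih (fun x hx => h x (List.mem_cons_of_mem _ hx)) _

theorem outerA_skip (i j : Int) (cols : List Int) (us1 rest : List Int)
    (h : ∀ u ∈ us1, u ≠ i) (idx : Int) :
    edgeOuterA i j cols idx (us1 ++ rest)
      = edgeOuterA i j cols (idx + (us1.map (fun u => colCount u cols)).sum) rest := by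
  induction us1 generalizing idx with
  | nil => simp
  | cons u us ih =>
    have hu : u ≠ i := h u (List.mem_cons_self ..)
    have hfind : ∀ v ∈ cols, ¬(u = i ∧ v = j) := fun v _ hh => hu hh.1
    rw [List.cons_append, edgeOuterA, innerA_no_find i j u cols hfind idx]
    show edgeOuterA i j cols (idx + colCount u cols) (us ++ rest) = _
    rw [ih (fun x hx => h x (List.mem_cons_of_mem _ hx))]
    congr 1
    simp; omega

-- colCount of u over range 0..N-1
theorem colCount_pyRange (u N : Int) (hN : 0 ≤ N) :
    colCount u (PySem.List.pyRange 0 N 1)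
      = N - (if 0 ≤ u ∧ u < N then 1 else 0) := by
  induction N, hN using Int.le_induction with
  | base => rw [PySem.List.pyRange_one_eq_nil le_rfl]; simp [colCount]
  | succ n hn ih =>
    rw [PySem.List.pyRange_one_succ_right hn]
    by_cases hu : u = n
    · subst hu
      have : colCount u (PySem.List.pyRange 0 u 1 ++ [u])
          = colCount u (PySem.List.pyRange 0 u 1) := by
        simp [colCount, List.filter_append]
      rw [this, ih, if_neg (by omega : ¬(0 ≤ u ∧ u < u)),
          if_pos (⟨hn, by omega⟩ : 0 ≤ u ∧ u < u + 1)]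
      omega
    · have : colCount u (PySem.List.pyRange 0 n 1 ++ [n])
          = colCount u (PySem.List.pyRange 0 n 1) + 1 := by
        simp [colCount, List.filter_append, Ne.symm hu]
      rw [this, ih]
      split_ifs <;> omega

theorem sum_colCount_range (N k : Int) (hk : 0 ≤ k) (hkN : k ≤ N) :
    ((PySem.List.pyRange 0 k 1).map
        (fun u => colCount u (PySem.List.pyRange 0 N 1))).sum
      = k * (N - 1) := by
  induction k, hk using Int.le_induction with
  | base => rw [PySem.List.pyRange_one_eq_nil le_rfl]; simp
  | succ n hn ih =>
    rw [PySem.List.pyRange_one_succ_right hn]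
    rw [List.map_append, List.sum_append, ih (by omega)]
    have : colCount n (PySem.List.pyRange 0 N 1) = N - 1 := by
      rw [colCount_pyRange n N (by omega)]
      split_ifs <;> omega
    simp [this]; ring

theorem edge_to_idx_main (i j N : Int) (hij : i ≠ j) :
    edge_to_idx i j N = edge_to_idx_alt i j N := by
  unfold edge_to_idx edge_to_idx_alt
  rw [if_neg hij, if_neg hij]
  by_cases hin : 0 ≤ i ∧ i < N ∧ 0 ≤ j ∧ j < N
  · obtain ⟨hi0, hiN, hj0, hjN⟩ := hin
    rw [if_pos ⟨hi0, hiN, hj0, hjN⟩]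
    -- skip the first i rows: each contributes N-1 to idx
    have hskip := outerA_skip i j (PySem.List.pyRange 0 N 1)
      (PySem.List.pyRange 0 i 1) (PySem.List.pyRange i N 1)
      (fun u hu => by have := PySem.List.mem_pyRange_one.mp hu; omega) 0
    rw [← PySem.List.pyRange_one_append 0 i N hi0 (le_of_lt hiN)] at hskip
    rw [hskip, sum_colCount_range N i hi0 (le_of_lt hiN)]
    -- enter row i
    rw [PySem.List.pyRange_one_cons hiN, edgeOuterA]
    -- within row i, the hit at column j
    have hfind := innerA_find i j hij (PySem.List.pyRange 0 j 1)
      (PySem.List.pyRange (j+1) N 1)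
      (fun h => by have := PySem.List.mem_pyRange_one.mp h; omega)
      (0 + i * (N - 1))
    rw [← PySem.List.pyRange_one_cons hjN,
        ← PySem.List.pyRange_one_append 0 j N hj0 (le_of_lt hjN)] at hfind
    rw [hfind]
    have hcc : colCount i (PySem.List.pyRange 0 j 1)
        = j - (if i < j then 1 else 0) := by
      rw [colCount_pyRange i j hj0]
      split_ifs <;> omega
    rw [hcc]
    ring_nf
  · rw [if_neg hin]
    apply outerA_none i j _ _ _ hij 0
    intro u hu hx
    obtain ⟨hui, hjc, _⟩ := hx
    have h1 := PySem.List.mem_pyRange_one.mp hu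
    have h2 := PySem.List.mem_pyRange_one.mp hjc
    omega

-- ===== VERDICT (by name: the statement is the Claim_ definition above) =====
theorem edge_to_idx_spec : Claim_equal_edge_to_idx := by
  intro i j N _ hpre
  exact edge_to_idx_main i j N hpre
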